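-- pv_equiv track=rewrite | github.com/zouweidong91/nlpcol | nlpcol/utils/snippets.py | text_segmentate
-- ===== SOURCE A (Python) =====
-- def text_segmentate(text, maxlen, seps='\n', strips=None):
--     """将文本按照标点符号划分为若干个短句
--     """
--     text = text.strip().strip(strips)
--     if seps and len(text) > maxlen:
--         pieces = text.split(seps[0])
--         text, texts = '', []
--         for i, p in enumerate(pieces):
--             if text and p and len(text) + len(p) > maxlen - 1:
--                 texts.extend(text_segmentate(text, maxlen, seps[1:], strips))
--                 text = ''
--             if i + 1 == len(pieces):
--                 text = text + p
--             else:
--                 text = text + p + seps[0]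
--         if text:
--             texts.extend(text_segmentate(text, maxlen, seps[1:], strips))
--         return texts
--     else:
--         return [text]
-- ===== SOURCE B (Python) =====
-- def text_segmentate(text, maxlen, seps='\n', strips=None):
--     """将文本按照标点符号划分为若干个短句 — level-synchronous worklist instead of recursion"""
--     def norm(t):
--         return t.strip().strip(strips)
--
--     def blocks(t, sep):
--         out, cur = [], ''
--         pieces = t.split(sep)
--         for i, p in enumerate(pieces):
--             if cur and p and len(cur) + len(p) > maxlen - 1:
--                 out.append(cur)
--                 cur = ''
--             cur += p if i + 1 == len(pieces) else p + sep
--         if cur: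
--             out.append(cur)
--         return out
--
--     items = [(False, text)]
--     for sep in seps:
--         nxt = []
--         for done, t in items:
--             if done:
--                 nxt.append((True, t))
--             else:
--                 u = norm(t)
--                 if len(u) <= maxlen:
--                     nxt.append((True, u))
--                 else:
--                     nxt.extend((False, b) for b in blocks(u, sep))
--         items = nxt
--     return [t if done else norm(t) for done, t in items]
-- ===== Notes on version B (the rewrite author's own statement) =====
-- stated objective: alternative
-- what changed: Replaces A's recursion over separator levels with a level-synchronous worklist: one pass per separator over a list of done/pending chunks, splitting each oversize pending chunk with the current separator, then a final strip-and-emit pass.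
import Mathlib
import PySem

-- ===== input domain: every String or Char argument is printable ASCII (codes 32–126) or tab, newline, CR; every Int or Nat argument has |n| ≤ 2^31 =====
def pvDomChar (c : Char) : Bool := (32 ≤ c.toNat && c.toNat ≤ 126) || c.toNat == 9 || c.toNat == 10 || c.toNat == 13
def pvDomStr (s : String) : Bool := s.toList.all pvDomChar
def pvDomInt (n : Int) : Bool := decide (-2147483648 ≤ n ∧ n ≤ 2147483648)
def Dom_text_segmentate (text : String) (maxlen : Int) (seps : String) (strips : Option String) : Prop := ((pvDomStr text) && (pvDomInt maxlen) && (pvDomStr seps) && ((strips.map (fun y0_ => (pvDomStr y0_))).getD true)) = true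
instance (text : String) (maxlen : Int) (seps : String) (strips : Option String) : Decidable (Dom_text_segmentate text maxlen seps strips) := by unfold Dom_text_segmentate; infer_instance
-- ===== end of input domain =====

-- B replaces A's recursion over separator levels by a level-synchronous worklist loop
-- (one pass per separator over a list of done/pending chunks); same return value, different decomposition.

-- t.strip().strip(strips)  (shared primitive composition; strips=None strips whitespace)
def pyStrip2 (t : List Char) (strips : Option (List Char)) : List Char :=
  match strips with
  | none => PySem.Chars.strip (PySem.Chars.strip t)
  | some cs => PySem.Chars.stripChars (PySem.Chars.strip t) cs

-- ===== PORT A =====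
-- body of A's 'for i, p in enumerate(pieces)' loop; state = (text, texts);
-- 'rec' is the recursive call at the next separator level, n = len(pieces)
def segAStep (rec : List Char → List (List Char)) (maxlen : Int) (s0 : Char) (n : Int)
    (st : List Char × List (List Char)) (ip : Int × List Char) : List Char × List (List Char) :=
  let st :=
    if st.1 ≠ [] ∧ ip.2 ≠ [] ∧ (st.1.length : Int) + ip.2.length > maxlen - 1
    then ([], st.2 ++ rec st.1) else st
  if ip.1 + 1 = n then (st.1 ++ ip.2, st.2) else (st.1 ++ ip.2 ++ [s0], st.2)

-- A, transliterated on List Char (recursion on the separator list, as in the Python)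
def segA (text : List Char) (maxlen : Int) (seps : List Char) (strips : Option (List Char)) : List (List Char) :=
  let t := pyStrip2 text strips
  match seps with
  | s0 :: rest =>
    if (t.length : Int) > maxlen then
      let pieces := PySem.Chars.splitOn t [s0]
      let st := (PySem.List.enumerate pieces).foldl
        (segAStep (fun u => segA u maxlen rest strips) maxlen s0 (pieces.length : Int)) ([], [])
      if st.1 ≠ [] then st.2 ++ segA st.1 maxlen rest strips else st.2
    else [t]
  | [] => [t]

def text_segmentate (text : String) (maxlen : Int) (seps : String) (strips : Option String) : List String :=
  (segA text.toList maxlen seps.toList (strips.map String.toList)).map String.ofList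

-- ===== PORT B =====
-- body of Source B's 'blocks' loop; state = (out, cur), n = len(pieces)
def bStep (maxlen : Int) (sep : Char) (n : Int)
    (st : List (List Char) × List Char) (ip : Int × List Char) : List (List Char) × List Char :=
  let st :=
    if st.2 ≠ [] ∧ ip.2 ≠ [] ∧ (st.2.length : Int) + ip.2.length > maxlen - 1
    then (st.1 ++ [st.2], []) else st
  if ip.1 + 1 = n then (st.1, st.2 ++ ip.2) else (st.1, st.2 ++ ip.2 ++ [sep])

-- Source B's 'blocks(t, sep)': the greedy merge at one level, no recursion
def blocksB (maxlen : Int) (sep : Char) (t : List Char) : List (List Char) :=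
  let pieces := PySem.Chars.splitOn t [sep]
  let st := (PySem.List.enumerate pieces).foldl (bStep maxlen sep (pieces.length : Int)) ([], [])
  if st.2 ≠ [] then st.1 ++ [st.2] else st.1

-- body of Source B's inner 'for done, t in items' loop: what one item contributes to nxt
def stepB (maxlen : Int) (strips : Option (List Char)) (sep : Char) (it : Bool × List Char) :
    List (Bool × List Char) :=
  if it.1 then [it]
  else
    let u := pyStrip2 it.2 strips
    if (u.length : Int) ≤ maxlen then [(true, u)]
    else (blocksB maxlen sep u).map (fun b => (false, b))

-- Source B's main worklist loop + final comprehension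
def segB (text : List Char) (maxlen : Int) (seps : List Char) (strips : Option (List Char)) :
    List (List Char) :=
  let items := seps.foldl
    (fun items sep => items.foldl (fun nxt it => nxt ++ stepB maxlen strips sep it) [])
    [(false, text)]
  items.map (fun it => if it.1 then it.2 else pyStrip2 it.2 strips)

def text_segmentate_alt (text : String) (maxlen : Int) (seps : String) (strips : Option String) : List String :=
  (segB text.toList maxlen seps.toList (strips.map String.toList)).map String.ofList

-- ===== PRECONDITION & SPEC =====
def Spec_text_segmentate (text : String) (maxlen : Int) (seps : String) (strips : Option String) (out : List String) : Prop := out = text_segmentate_alt text maxlen seps strips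
instance (text : String) (maxlen : Int) (seps : String) (strips : Option String) (out : List String) : Decidable (Spec_text_segmentate text maxlen seps strips out) := by unfold Spec_text_segmentate; infer_instance

-- ===== CLAIM (what is proved, stated in full; the proofs are below) =====
def Claim_equal_text_segmentate : Prop := ∀ (text : String) (maxlen : Int) (seps : String) (strips : Option String), Dom_text_segmentate text maxlen seps strips → Spec_text_segmentate text maxlen seps strips (text_segmentate text maxlen seps strips)

-- ===== LEMMAS AND PROOFS =====

-- what one item of B's worklist eventually contributes, in A's terms
def resA (maxlen : Int) (seps : List Char) (strips : Option (List Char)) (it : Bool × List Char) :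
    List (List Char) :=
  if it.1 then [it.2] else segA it.2 maxlen seps strips

-- A's merge loop, started at (c, o.flatMap rec), is B's merge loop at (o, c) with rec flat-mapped in
theorem loop_rel (rec : List Char → List (List Char)) (maxlen : Int) (s0 : Char) (n : Int)
    (l : List (Int × List Char)) : ∀ (c : List Char) (o : List (List Char)),
    l.foldl (segAStep rec maxlen s0 n) (c, o.flatMap rec)
      = ((l.foldl (bStep maxlen s0 n) (o, c)).2, (l.foldl (bStep maxlen s0 n) (o, c)).1.flatMap rec) := by
  induction l with
  | nil => intro c o; rfl
  | cons ip l ih =>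
    intro c o
    simp only [List.foldl_cons, segAStep, bStep]
    split_ifs <;> dsimp only <;>
      (try rw [show List.flatMap rec o ++ rec c = List.flatMap rec (o ++ [c]) by simp]) <;>
      exact ih _ _

-- A's level (split + interleaved recursion) = B's blocks, flat-mapped through rec
theorem seg_blocks (rec : List Char → List (List Char)) (maxlen : Int) (s0 : Char) (t : List Char) :
    (if ((PySem.List.enumerate (PySem.Chars.splitOn t [s0])).foldl
          (segAStep rec maxlen s0 ((PySem.Chars.splitOn t [s0]).length : Int)) ([], [])).1 ≠ []
     then ((PySem.List.enumerate (PySem.Chars.splitOn t [s0])).foldl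
          (segAStep rec maxlen s0 ((PySem.Chars.splitOn t [s0]).length : Int)) ([], [])).2
        ++ rec ((PySem.List.enumerate (PySem.Chars.splitOn t [s0])).foldl
          (segAStep rec maxlen s0 ((PySem.Chars.splitOn t [s0]).length : Int)) ([], [])).1
     else ((PySem.List.enumerate (PySem.Chars.splitOn t [s0])).foldl
          (segAStep rec maxlen s0 ((PySem.Chars.splitOn t [s0]).length : Int)) ([], [])).2)
      = (blocksB maxlen s0 t).flatMap rec := by
  have h := loop_rel rec maxlen s0 ((PySem.Chars.splitOn t [s0]).length : Int)
    (PySem.List.enumerate (PySem.Chars.splitOn t [s0])) [] []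
  simp only [List.flatMap_nil] at h
  simp only [blocksB, h]
  split_ifs with hc <;> simp [List.flatMap_append]

-- one pending item through one separator level
theorem step_res (maxlen : Int) (strips : Option (List Char)) (s0 : Char) (rest : List Char)
    (t : List Char) :
    segA t maxlen (s0 :: rest) strips
      = (stepB maxlen strips s0 (false, t)).flatMap (resA maxlen rest strips) := by
  by_cases h : ((pyStrip2 t strips).length : Int) > maxlen
  · have hn : ¬ ((pyStrip2 t strips).length : Int) ≤ maxlen := by omega
    simp only [segA, stepB, if_pos h, Bool.false_eq_true, if_false, if_neg hn]
    rw [seg_blocks (fun u => segA u maxlen rest strips) maxlen s0 (pyStrip2 t strips)]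
    simp [resA, List.flatMap_map]
  · have hn : ((pyStrip2 t strips).length : Int) ≤ maxlen := by omega
    simp only [segA, stepB, if_neg h, Bool.false_eq_true, if_false, if_pos hn]
    simp [resA]

-- the worklist invariant: running B's remaining levels then finalizing
-- equals flat-mapping A's remaining recursion over the worklist
theorem levels_rel (maxlen : Int) (strips : Option (List Char)) (seps : List Char) :
    ∀ (items : List (Bool × List Char)),
    ((seps.foldl
        (fun items sep => items.foldl (fun nxt it => nxt ++ stepB maxlen strips sep it) [])
        items).map (fun it => if it.1 then it.2 else pyStrip2 it.2 strips))
      = items.flatMap (resA maxlen seps strips) := by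
  induction seps with
  | nil =>
    intro items
    simp only [List.foldl_nil]
    induction items with
    | nil => rfl
    | cons it l ih =>
      simp only [List.map_cons, List.flatMap_cons, ih]
      rcases it with ⟨d, t⟩
      cases d <;> simp [resA, segA]
  | cons s0 rest ih =>
    intro items
    simp only [List.foldl_cons]
    rw [PySem.List.foldl_append_eq_flatMap (stepB maxlen strips s0) items []]
    simp only [List.nil_append]
    rw [ih (items.flatMap (stepB maxlen strips s0)), List.flatMap_assoc]
    apply List.flatMap_congr
    intro it _
    rcases it with ⟨d, t⟩
    cases d
    · exact (step_res maxlen strips s0 rest t).symm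
    · simp [stepB, resA]

theorem segB_eq_segA (text : List Char) (maxlen : Int) (seps : List Char)
    (strips : Option (List Char)) : segB text maxlen seps strips = segA text maxlen seps strips := by
  simp only [segB]
  rw [levels_rel maxlen strips seps [(false, text)]]
  simp [resA]

-- ===== VERDICT (by name: the statement is the Claim_ definition above) =====
theorem text_segmentate_spec : Claim_equal_text_segmentate := by
  intro text maxlen seps strips _
  show _ = _
  simp only [text_segmentate, text_segmentate_alt, segB_eq_segA]
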